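-- pv_equiv track=rewrite | github.com/yejin7211/Algorithm | 프로그래머스/lv3/42895. N으로 표현/N으로 표현.py | solution
-- ===== SOURCE A (Python) =====
-- def solution(N, number):
--     dp = [set() for _ in range(9)]
--     for cnt in range(1, 9):
--         dp[cnt].add(int(str(N) * cnt))
--         for i in range(cnt//2 + 1):
--             for left in dp[i]:
--                 for right in dp[cnt-i]:
--                     dp[cnt].add(left + right)
--                     dp[cnt].add(left - right)
--                     dp[cnt].add(right - left)
--                     dp[cnt].add(left * right)
--                     if right != 0:
--                         dp[cnt].add(left // right)
--                     if left != 0: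
--                         dp[cnt].add(right // left)
--         if number in dp[cnt]:
--             return cnt
--     return -1
-- ===== SOURCE B (Python) =====
-- def solution(N, number):
--     memo = {}
--
--     def build(cnt):
--         # set of values expressible with exactly cnt copies of N
--         if cnt in memo:
--             return memo[cnt]
--         vals = {int(str(N) * cnt)}
--         for i in range(1, cnt):
--             for l in build(i):
--                 for r in build(cnt - i):
--                     vals.add(l + r)
--                     vals.add(l - r)
--                     vals.add(l * r)
--                     if r != 0:
--                         vals.add(l // r)
--         memo[cnt] = vals
--         return vals
--
--     for cnt in range(1, 9):
--         if number in build(cnt):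
--             return cnt
--     return -1
-- ===== Notes on version B (the rewrite author's own statement) =====
-- stated objective: alternative
-- what changed: Replaced the iterative dp-array with half-range splits and six symmetric operations per pair by a memoized recursive build(cnt) over the full split range 1..cnt-1 using only the four one-sided operations +,-,*,//; the solution body just probes build(1)..build(8).
import Mathlib
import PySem

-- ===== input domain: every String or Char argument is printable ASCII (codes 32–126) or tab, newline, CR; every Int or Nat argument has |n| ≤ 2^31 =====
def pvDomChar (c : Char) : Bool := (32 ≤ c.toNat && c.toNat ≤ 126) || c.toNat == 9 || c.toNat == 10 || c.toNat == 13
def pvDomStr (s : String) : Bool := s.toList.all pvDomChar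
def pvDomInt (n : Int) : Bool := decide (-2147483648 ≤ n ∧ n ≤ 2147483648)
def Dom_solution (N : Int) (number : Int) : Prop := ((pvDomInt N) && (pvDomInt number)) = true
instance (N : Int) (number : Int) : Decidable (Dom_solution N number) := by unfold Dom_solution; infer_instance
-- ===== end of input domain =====

-- B re-implements A as a memoized recursion build(cnt) over the full split range with the
-- four one-sided operations, instead of A's dp array over half-range splits with six
-- symmetric operations; equal return values are proved on Pre_ (where Python A returns).
-- Both ports model the internal Python 'set' values with Std.HashSet Int (hash set, as in
-- CPython): every add/membership step is the same; only membership of the final sets can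
-- influence the returned Int, never an iteration order.

-- ===== PORT A =====
-- int(str(N) * cnt): identical expression in both Pythons; total form via getD 0 — on Pre_
-- the parse succeeds whenever this expression is actually reached (N ≥ 0, or cnt = 1).
def pyBase (N : Int) (cnt : Nat) : Int :=
  (PySem.Int.ofChars? (PySem.List.pyRepeat (PySem.Int.toChars N) (cnt : Int))).getD 0

-- the six adds of A's innermost loop body
def opsAddA (s : Std.HashSet Int) (left right : Int) : Std.HashSet Int :=
  let s := s.insert (left + right)
  let s := s.insert (left - right)
  let s := s.insert (right - left)
  let s := s.insert (left * right)
  let s := if right ≠ 0 then s.insert (PySem.Int.floordiv left right) else s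
  if left ≠ 0 then s.insert (PySem.Int.floordiv right left) else s

-- the body of one iteration of A's 'for cnt' loop: dp[cnt].add(int(str(N)*cnt)) then the
-- triple loop 'for i in range(cnt//2+1): for left in dp[i]: for right in dp[cnt-i]: …'
-- (a Python set's hash iteration order is not modelled; the resulting SET, hence the
-- returned count, does not depend on it since each add depends only on left and right)
def stepA (dp : List (Std.HashSet Int)) (N : Int) (cnt : Nat) : Std.HashSet Int :=
  (List.range (cnt / 2 + 1)).foldl
    (fun s i =>
      (dp.getD i ∅).toList.foldl
        (fun s left =>
          (dp.getD (cnt - i) ∅).toList.foldl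
            (fun s right => opsAddA s left right) s)
        s)
    ((dp.getD cnt ∅).insert (pyBase N cnt))

-- 'for cnt in range(1, 9): … if number in dp[cnt]: return cnt' / 'return -1'
def solutionLoop (N number : Int) (dp : List (Std.HashSet Int)) : List Nat → Int
  | [] => -1
  | cnt :: rest =>
    let s := stepA dp N cnt
    if s.contains number then (cnt : Int)
    else solutionLoop N number (dp.set cnt s) rest

def solution (N : Int) (number : Int) : Int :=
  solutionLoop N number (List.replicate 9 ∅) [1, 2, 3, 4, 5, 6, 7, 8]

-- ===== PORT B =====
-- the four adds of B's innermost loop body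
def ops4 (vals : Std.HashSet Int) (l r : Int) : Std.HashSet Int :=
  let vals := vals.insert (l + r)
  let vals := vals.insert (l - r)
  let vals := vals.insert (l * r)
  if r ≠ 0 then vals.insert (PySem.Int.floordiv l r) else vals

-- build(cnt) of Source B; the memo dict is a pure cache there, the recursion computes the
-- same set values
def build (N : Int) : Nat → Std.HashSet Int
  | cnt =>
    (List.range' 1 (cnt - 1)).attach.foldl
      (fun vals ⟨i, _hi⟩ =>
        (build N i).toList.foldl
          (fun vals l =>
            (build N (cnt - i)).toList.foldl (fun vals r => ops4 vals l r) vals)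
          vals)
      ((∅ : Std.HashSet Int).insert (pyBase N cnt))
  termination_by cnt => cnt
  decreasing_by
  · have := List.mem_range'_1.mp _hi; omega
  · have := List.mem_range'_1.mp _hi; omega

-- 'for cnt in range(1, 9): if number in build(cnt): return cnt' / 'return -1'
def solutionAltLoop (N number : Int) : List Nat → Int
  | [] => -1
  | cnt :: rest =>
    if (build N cnt).contains number then (cnt : Int)
    else solutionAltLoop N number rest

def solution_alt (N : Int) (number : Int) : Int :=
  solutionAltLoop N number [1, 2, 3, 4, 5, 6, 7, 8]

-- ===== PRECONDITION & SPEC =====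
-- Pre_ excludes exactly the inputs where Python A raises: for N < 0 with number ≠ N the
-- expression int(str(N) * cnt) at cnt = 2 raises ValueError ("-5-5" is not an int).
def Pre_solution (N : Int) (number : Int) : Prop := 0 ≤ N ∨ number = N
instance (N : Int) (number : Int) : Decidable (Pre_solution N number) := by
  unfold Pre_solution; infer_instance

def pvWitness_solution : Int × Int := (5, 12)

def Spec_solution (N : Int) (number : Int) (out : Int) : Prop := out = solution_alt N number
instance (N : Int) (number : Int) (out : Int) : Decidable (Spec_solution N number out) := by
  unfold Spec_solution; infer_instance

-- ===== CLAIM (what is proved, stated in full; the proofs are below) =====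
def Claim_equal_solution : Prop := ∀ (N : Int) (number : Int), Dom_solution N number → Pre_solution N number → Spec_solution N number (solution N number)

-- ===== LEMMAS AND PROOFS =====

-- the six results A can add for a pair (left, right)
def C (l r x : Int) : Prop :=
  l + r = x ∨ l - r = x ∨ r - l = x ∨ l * r = x ∨
    (r ≠ 0 ∧ PySem.Int.floordiv l r = x) ∨ (l ≠ 0 ∧ PySem.Int.floordiv r l = x)

-- the four results B adds for an ordered pair (l, r)
def C4 (l r x : Int) : Prop :=
  l + r = x ∨ l - r = x ∨ l * r = x ∨ (r ≠ 0 ∧ PySem.Int.floordiv l r = x)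

lemma C_symm {l r x : Int} (h : C l r x) : C r l x := by
  unfold C at h ⊢
  rcases h with h | h | h | h | h | h
  · exact Or.inl (by rw [Int.add_comm]; exact h)
  · exact Or.inr (Or.inr (Or.inl h))
  · exact Or.inr (Or.inl h)
  · exact Or.inr (Or.inr (Or.inr (Or.inl (by rw [Int.mul_comm]; exact h))))
  · exact Or.inr (Or.inr (Or.inr (Or.inr (Or.inr h))))
  · exact Or.inr (Or.inr (Or.inr (Or.inr (Or.inl h))))

lemma C_iff_C4 {l r x : Int} : C l r x ↔ C4 l r x ∨ C4 r l x := by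
  unfold C C4
  constructor
  · rintro (h | h | h | h | h | h)
    · exact Or.inl (Or.inl h)
    · exact Or.inl (Or.inr (Or.inl h))
    · exact Or.inr (Or.inr (Or.inl h))
    · exact Or.inl (Or.inr (Or.inr (Or.inl h)))
    · exact Or.inl (Or.inr (Or.inr (Or.inr h)))
    · exact Or.inr (Or.inr (Or.inr (Or.inr h)))
  · rintro ((h | h | h | h) | (h | h | h | h))
    · exact Or.inl h
    · exact Or.inr (Or.inl h)
    · exact Or.inr (Or.inr (Or.inr (Or.inl h)))
    · exact Or.inr (Or.inr (Or.inr (Or.inr (Or.inl h))))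
    · exact Or.inl (by rw [Int.add_comm]; exact h)
    · exact Or.inr (Or.inr (Or.inl h))
    · exact Or.inr (Or.inr (Or.inr (Or.inl (by rw [Int.mul_comm]; exact h))))
    · exact Or.inr (Or.inr (Or.inr (Or.inr (Or.inr h))))

-- the values expressible with exactly cnt copies of N
inductive Reach (N : Int) : Nat → Int → Prop
  | base (cnt : Nat) : Reach N cnt (pyBase N cnt)
  | combine {i j : Nat} {l r x : Int} :
      1 ≤ i → 1 ≤ j → Reach N i l → Reach N j r → C l r x → Reach N (i + j) x

-- membership through a fold whose step only adds elements
lemma mem_foldl_iff {α : Type} (step : Std.HashSet Int → α → Std.HashSet Int)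
    (g : α → Int → Prop) (h : ∀ s a y, y ∈ step s a ↔ y ∈ s ∨ g a y) :
    ∀ (L : List α) (s : Std.HashSet Int) (y : Int),
      y ∈ L.foldl step s ↔ y ∈ s ∨ ∃ a ∈ L, g a y := by
  intro L
  induction L with
  | nil => simp
  | cons a L ih =>
    intro s y
    simp only [List.foldl_cons, ih, h, List.mem_cons]
    constructor
    · rintro ((hy | hy) | ⟨b, hb, hg⟩)
      · exact Or.inl hy
      · exact Or.inr ⟨a, Or.inl rfl, hy⟩
      · exact Or.inr ⟨b, Or.inr hb, hg⟩
    · rintro (hy | ⟨b, hb | hb, hg⟩)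
      · exact Or.inl (Or.inl hy)
      · subst hb; exact Or.inl (Or.inr hg)
      · exact Or.inr ⟨b, hb, hg⟩

lemma mem_opsAddA {s : Std.HashSet Int} {l r y : Int} :
    y ∈ opsAddA s l r ↔ y ∈ s ∨ C l r y := by
  unfold opsAddA C
  split_ifs with h1 h2 h2 <;>
    simp only [Std.HashSet.mem_insert, beq_iff_eq] <;> tauto

lemma mem_ops4 {s : Std.HashSet Int} {l r y : Int} :
    y ∈ ops4 s l r ↔ y ∈ s ∨ C4 l r y := by
  unfold ops4 C4
  split_ifs with h1 <;> simp only [Std.HashSet.mem_insert, beq_iff_eq] <;> tauto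

lemma mem_stepA (dp : List (Std.HashSet Int)) (N : Int) (cnt : Nat) (y : Int) :
    y ∈ stepA dp N cnt ↔
      (y ∈ dp.getD cnt ∅ ∨ pyBase N cnt = y) ∨
        ∃ i ∈ List.range (cnt / 2 + 1), ∃ l ∈ dp.getD i ∅,
          ∃ r ∈ dp.getD (cnt - i) ∅, C l r y := by
  unfold stepA
  rw [mem_foldl_iff _
    (fun i y => ∃ l ∈ (dp.getD i ∅).toList,
      ∃ r ∈ (dp.getD (cnt - i) ∅).toList, C l r y)
    (by
      intro s i y
      rw [mem_foldl_iff _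
        (fun l y => ∃ r ∈ (dp.getD (cnt - i) ∅).toList, C l r y)
        (by
          intro s l y
          rw [mem_foldl_iff _ (fun r y => C l r y)
            (by intro s r y; exact mem_opsAddA)])])]
  simp only [Std.HashSet.mem_insert, beq_iff_eq, Std.HashSet.mem_toList]
  tauto

lemma mem_build (N : Int) (cnt : Nat) (y : Int) :
    y ∈ build N cnt ↔
      pyBase N cnt = y ∨
        ∃ i : Nat, 1 ≤ i ∧ i < cnt ∧
          ∃ l ∈ build N i, ∃ r ∈ build N (cnt - i), C4 l r y := by
  conv_lhs => rw [build]
  rw [mem_foldl_iff _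
    (fun (a : {x // x ∈ List.range' 1 (cnt - 1)}) y =>
      ∃ l ∈ (build N a.1).toList, ∃ r ∈ (build N (cnt - a.1)).toList, C4 l r y)
    (by
      rintro s ⟨i, hi⟩ y
      rw [mem_foldl_iff _
        (fun l y => ∃ r ∈ (build N (cnt - i)).toList, C4 l r y)
        (by
          intro s l y
          rw [mem_foldl_iff _ (fun r y => C4 l r y)
            (by intro s r y; exact mem_ops4)])])]
  simp only [Std.HashSet.mem_insert, beq_iff_eq, Std.HashSet.mem_toList,
    List.mem_attach, true_and, Subtype.exists, List.mem_range'_1]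
  constructor
  · rintro ((h | h) | ⟨i, ⟨h1, h2⟩, hg⟩)
    · exact Or.inl h
    · simp at h
    · exact Or.inr ⟨i, h1, by omega, hg⟩
  · rintro (h | ⟨i, h1, h2, hg⟩)
    · exact Or.inl (Or.inl h)
    · exact Or.inr ⟨i, ⟨h1, by omega⟩, hg⟩

lemma build_char (N : Int) :
    ∀ cnt : Nat, 1 ≤ cnt → ∀ y : Int, (y ∈ build N cnt ↔ Reach N cnt y) := by
  intro cnt
  induction cnt using Nat.strong_induction_on with
  | _ cnt ih =>
    intro hc y
    rw [mem_build]
    constructor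
    · rintro (h | ⟨i, h1, h2, l, hl, r, hr, hg⟩)
      · rw [← h]; exact Reach.base cnt
      · have hel : Reach N i l := (ih i h2 h1 l).mp hl
        have her : Reach N (cnt - i) r :=
          (ih (cnt - i) (by omega) (by omega) r).mp hr
        have : Reach N (i + (cnt - i)) y :=
          Reach.combine h1 (by omega) hel her (C_iff_C4.mpr (Or.inl hg))
        simpa [Nat.add_sub_cancel' (by omega : i ≤ cnt)] using this
    · intro h
      cases h with
      | base => exact Or.inl rfl
      | @combine i j l r x h1 h2 hel her hg =>
        have hl : l ∈ build N i := (ih i (by omega) h1 l).mpr hel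
        have hr : r ∈ build N j := (ih j (by omega) h2 r).mpr her
        rcases C_iff_C4.mp hg with hg4 | hg4
        · exact Or.inr ⟨i, h1, by omega, l, hl, r, by simpa [Nat.add_sub_cancel_left] using hr, hg4⟩
        · exact Or.inr ⟨j, h2, by omega, r, hr, l, by simpa [Nat.add_sub_cancel] using hl, hg4⟩

-- invariant of A's loop: dp has its 9 slots, the processed slots hold exactly the
-- expressible values, the unprocessed ones are still empty
def DpInv (N : Int) (dp : List (Std.HashSet Int)) (c : Nat) : Prop :=
  dp.length = 9 ∧
    (∀ j, j < c → ∀ x : Int,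
      (x ∈ dp.getD j ∅ ↔ 1 ≤ j ∧ Reach N j x)) ∧
    (∀ j, c ≤ j → dp.getD j ∅ = (∅ : Std.HashSet Int))

lemma stepA_char {N : Int} {dp : List (Std.HashSet Int)} {c : Nat}
    (h : DpInv N dp c) (hc : 1 ≤ c) :
    ∀ y : Int, (y ∈ stepA dp N c ↔ Reach N c y) := by
  intro y
  obtain ⟨hlen, hlt, hge⟩ := h
  rw [mem_stepA, hge c le_rfl]
  constructor
  · rintro ((h0 | hb) | ⟨i, hi, l, hl, r, hr, hg⟩)
    · simp at h0
    · rw [← hb]; exact Reach.base c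
    · have hic : i < c := by have := List.mem_range.mp hi; omega
      obtain ⟨hi1, hel⟩ := (hlt i hic l).mp hl
      obtain ⟨hr1, her⟩ := (hlt (c - i) (by omega) r).mp hr
      have := Reach.combine hi1 hr1 hel her hg
      simpa [Nat.add_sub_cancel' (le_of_lt hic)] using this
  · intro h
    cases h with
    | base => exact Or.inl (Or.inr rfl)
    | @combine i j l r x h1 h2 hel her hg =>
      by_cases hij : i ≤ (i + j) / 2
      · refine Or.inr ⟨i, List.mem_range.mpr (by omega), l,
          (hlt i (by omega) l).mpr ⟨h1, hel⟩, r, ?_, hg⟩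
        rw [Nat.add_sub_cancel_left]
        exact (hlt j (by omega) r).mpr ⟨h2, her⟩
      · refine Or.inr ⟨j, List.mem_range.mpr (by omega), r,
          (hlt j (by omega) r).mpr ⟨h2, her⟩, l, ?_, C_symm hg⟩
        rw [Nat.add_sub_cancel]
        exact (hlt i (by omega) l).mpr ⟨h1, hel⟩

lemma Inv_step {N : Int} {dp : List (Std.HashSet Int)} {c : Nat}
    (h : DpInv N dp c) (hc : 1 ≤ c) (hc9 : c < 9) :
    DpInv N (dp.set c (stepA dp N c)) (c + 1) := by
  obtain ⟨hlen, hlt, hge⟩ := h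
  have hset_ne : ∀ j : Nat, j ≠ c →
      (dp.set c (stepA dp N c)).getD j ∅ = dp.getD j ∅ := by
    intro j hj
    simp [List.getD_eq_getElem?_getD, List.getElem?_set_ne (Ne.symm hj)]
  refine ⟨by simpa using hlen, ?_, ?_⟩
  · intro j hj x
    by_cases hjc : j = c
    · subst hjc
      have hself : (dp.set j (stepA dp N j)).getD j ∅ = stepA dp N j := by
        simp [List.getD_eq_getElem?_getD, hlen.symm ▸ hc9]
      rw [hself]
      exact ⟨fun hx => ⟨hc, (stepA_char ⟨hlen, hlt, hge⟩ hc x).mp hx⟩,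
        fun hx => (stepA_char ⟨hlen, hlt, hge⟩ hc x).mpr hx.2⟩
    · rw [hset_ne j hjc]
      exact hlt j (by omega) x
  · intro j hj
    rw [hset_ne j (by omega)]
    exact hge j (by omega)

lemma loop_eq (N number : Int) :
    ∀ (n c : Nat) (dp : List (Std.HashSet Int)), DpInv N dp c → 1 ≤ c → c + n ≤ 9 →
      solutionLoop N number dp (List.range' c n) =
        solutionAltLoop N number (List.range' c n) := by
  intro n
  induction n with
  | zero =>
    intro c dp h hc hle
    simp [solutionLoop, solutionAltLoop]
  | succ n ih =>
    intro c dp h hc hle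
    rw [List.range'_succ]
    simp only [solutionLoop, solutionAltLoop]
    have hmem : (stepA dp N c).contains number = (build N c).contains number := by
      apply Bool.eq_iff_iff.mpr
      rw [Std.HashSet.contains_iff_mem, Std.HashSet.contains_iff_mem]
      exact (stepA_char h hc number).trans (build_char N c hc number).symm
    rw [hmem]
    by_cases hcond : (build N c).contains number = true
    · rw [if_pos hcond, if_pos hcond]
    · rw [if_neg hcond, if_neg hcond]
      exact ih (c + 1) (dp.set c (stepA dp N c))
        (Inv_step h hc (by omega)) (by omega) (by omega)

-- ===== VERDICT (by name: the statement is the Claim_ definition above) =====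
theorem solution_spec : Claim_equal_solution := by
  intro N number _ _
  unfold Spec_solution solution solution_alt
  have h8 : ([1, 2, 3, 4, 5, 6, 7, 8] : List Nat) = List.range' 1 8 := by decide
  rw [h8]
  refine loop_eq N number 8 1 (List.replicate 9 ∅) ⟨?_, ?_, ?_⟩ le_rfl (by omega)
  · simp
  · intro j hj x
    have hj0 : j = 0 := by omega
    subst hj0
    constructor
    · intro hx; simp at hx
    · rintro ⟨h1, -⟩; omega
  · intro j hj
    rcases Nat.lt_or_ge j 9 with h9 | h9
    · interval_cases j <;> rfl
    · exact List.getD_eq_default _ _ (by simpa using h9)
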